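-- pv_equiv track=rewrite | github.com/RJmsG/ACPL | compilemod.py | linef
-- ===== SOURCE A (Python) =====
-- def linef(args):
--   b = []
--   a = []
--   c = 0
--   for i in args:
--     c += 1
--     a = []
--     for o in range(len(i)):
--       if not o > (len(i) - 2):
--         a.append(i[o])
--       elif c == len(args):
--         a.append(i[o])
--     i = ''.join(a)
--     b.append(i)
--   return(b)
-- ===== SOURCE B (Python) =====
-- def linef(args):
--   if not args:
--     return []
--   return [s[:-1] for s in args[:-1]] + [args[-1]]
-- ===== Notes on version B (the rewrite author's own statement) =====
-- stated objective: simpler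
-- what changed: Replaces the running counter and the per-character index loop (rebuilding each string char by char with ''.join) with a split of the list: slice s[:-1] on every element but the last, the last element kept whole.
import Mathlib
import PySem

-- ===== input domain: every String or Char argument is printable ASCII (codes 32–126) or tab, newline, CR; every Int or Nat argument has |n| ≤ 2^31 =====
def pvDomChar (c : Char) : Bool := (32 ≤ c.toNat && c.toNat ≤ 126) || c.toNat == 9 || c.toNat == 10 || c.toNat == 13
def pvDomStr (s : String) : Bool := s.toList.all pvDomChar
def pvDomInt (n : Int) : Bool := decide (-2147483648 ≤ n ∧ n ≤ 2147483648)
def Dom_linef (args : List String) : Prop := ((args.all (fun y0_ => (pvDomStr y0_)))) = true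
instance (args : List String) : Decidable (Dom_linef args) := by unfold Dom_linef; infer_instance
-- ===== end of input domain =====

-- B strips the last char of every element but the last by slicing args[:-1] / s[:-1] instead of
-- A's running counter and per-character index loop; objective: simpler.

-- ===== PORT A =====
def linef (args : List String) : List String :=
  (args.foldl
    (fun (st : List String × Int) (i : String) =>
      (st.1 ++ [String.ofList (
        (PySem.List.pyRange 0 (PySem.Str.len i) 1).foldl
          (fun (a : List Char) (o : Int) =>
            if ¬ (o > PySem.Str.len i - 2) then a ++ [PySem.List.pyGetD i.toList o ' ']
            else if st.2 + 1 = (args.length : Int) then a ++ [PySem.List.pyGetD i.toList o ' ']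
            else a) [])], st.2 + 1))
    ([], 0)).1

-- ===== PORT B =====
def linef_alt (args : List String) : List String :=
  if args.isEmpty then []
  else
    (PySem.List.slice args none (some (-1))).map
      (fun s => PySem.Str.slice s none (some (-1)))
    ++ [PySem.List.pyGetD args (-1) ""]

-- ===== PRECONDITION & SPEC =====
def Spec_linef (args : List String) (out : List String) : Prop := out = linef_alt args
instance (args : List String) (out : List String) : Decidable (Spec_linef args out) := by unfold Spec_linef; infer_instance

-- ===== CLAIM (what is proved, stated in full; the proofs are below) =====
def Claim_equal_linef : Prop := ∀ (args : List String), Dom_linef args → Spec_linef args (linef args)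

-- ===== LEMMAS AND PROOFS =====

-- recursive characterisation of B's port, convenient for the induction
def altRec : List String → List String
  | [] => []
  | [i] => [i]
  | i :: t => PySem.Str.slice i none (some (-1)) :: altRec t

lemma altRec_ne (l : List String) (h : l ≠ []) :
    altRec l = l.dropLast.map (fun s => PySem.Str.slice s none (some (-1))) ++ [l.getLast h] := by
  induction l with
  | nil => exact absurd rfl h
  | cons i t ih =>
    cases t with
    | nil => simp [altRec]
    | cons j u =>
      simp only [altRec, ih (by simp), List.dropLast_cons_of_ne_nil (by simp : j :: u ≠ []),
        List.map_cons, List.getLast_cons (by simp : j :: u ≠ [])]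
      simp

lemma altRec_eq (args : List String) : linef_alt args = altRec args := by
  cases hargs : args with
  | nil => simp [linef_alt, altRec]
  | cons i t =>
    rw [linef_alt]
    simp only [List.isEmpty_cons, Bool.false_eq_true, if_false]
    rw [PySem.List.slice_to_neg_one, PySem.List.pyGetD_neg_one (i :: t) "" (by simp),
      altRec_ne (i :: t) (by simp)]

lemma strip_eq (s : String) :
    PySem.Str.slice s none (some (-1)) = String.ofList s.toList.dropLast := by
  apply String.ext
  simp [PySem.List.slice_to_neg_one]

-- inner loop, non-last element: drops the final char
lemma inner_notlast (s : List Char) :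
    (PySem.List.pyRange 0 (s.length : Int) 1).foldl
      (fun (a : List Char) (o : Int) =>
        if ¬ (o > (s.length : Int) - 2) then a ++ [PySem.List.pyGetD s o ' ']
        else a) [] = s.dropLast := by
  rcases eq_or_ne s [] with rfl | hne
  · simp [PySem.List.pyRange_one_eq_nil]
  · have hlen : 1 ≤ s.length := List.length_pos_of_ne_nil hne
    have hsplit : PySem.List.pyRange 0 (s.length : Int) 1
        = PySem.List.pyRange 0 ((s.length - 1 : Nat) : Int) 1 ++ [((s.length - 1 : Nat) : Int)] := by
      have h : (s.length : Int) = ((s.length - 1 : Nat) : Int) + 1 := by omega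
      rw [h, PySem.List.pyRange_one_succ_right]
      omega
    rw [hsplit, List.foldl_append]
    have hpre : (PySem.List.pyRange 0 ((s.length - 1 : Nat) : Int) 1).foldl
        (fun (a : List Char) (o : Int) =>
          if ¬ (o > (s.length : Int) - 2) then a ++ [PySem.List.pyGetD s o ' ']
          else a) [] = s.dropLast := by
      have hcongr := PySem.List.foldl_congr_mem
        (PySem.List.pyRange 0 ((s.length - 1 : Nat) : Int) 1)
        (fun (a : List Char) (o : Int) =>
          if ¬ (o > (s.length : Int) - 2) then a ++ [PySem.List.pyGetD s o ' ']
          else a)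
        (fun (a : List Char) (o : Int) => a ++ [PySem.List.pyGetD s.dropLast o ' '])
        []
        (by
          intro acc o ho
          rw [PySem.List.mem_pyRange_one] at ho
          have h2 : ¬ ((o : Int) > (s.length : Int) - 2) := by omega
          simp only [h2, not_false_iff, if_pos]
          congr 1
          rw [PySem.List.pyGetD_of_nonneg _ _ ho.1, PySem.List.pyGetD_of_nonneg _ _ ho.1]
          have hlt : o.toNat < s.length - 1 := by omega
          have h4 : o.toNat < s.length := by omega
          simp [List.getD, hlt, h4])
      rw [hcongr]
      have hb : ((s.length - 1 : Nat) : Int) = (s.dropLast.length : Int) := by simp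
      rw [hb, PySem.List.foldl_pyRange_zero_pyGetD' s.dropLast ' ' (fun a c => a ++ [c]) []]
      exact PySem.List.foldl_append_singleton _ []
    rw [hpre]
    have h3 : ((s.length - 1 : Nat) : Int) > (s.length : Int) - 2 := by omega
    simp [h3]

-- outer loop invariant: folding A's body over the suffix l, with counter c0 and c0 + |l| = N,
-- appends altRec l to the accumulator
lemma outer (N : Int) (l : List String) : ∀ (b : List String) (c0 : Int),
    c0 + l.length = N →
    (l.foldl
      (fun (st : List String × Int) (i : String) =>
        (st.1 ++ [String.ofList (
          (PySem.List.pyRange 0 (PySem.Str.len i) 1).foldl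
            (fun (a : List Char) (o : Int) =>
              if ¬ (o > PySem.Str.len i - 2) then a ++ [PySem.List.pyGetD i.toList o ' ']
              else if st.2 + 1 = N then a ++ [PySem.List.pyGetD i.toList o ' ']
              else a) [])], st.2 + 1))
      (b, c0)).1 = b ++ altRec l := by
  induction l with
  | nil => intro b c0 _; simp [altRec]
  | cons i t ih =>
    intro b c0 hc
    simp only [List.foldl_cons]
    rcases eq_or_ne t [] with rfl | ht
    · have hlast : c0 + 1 = N := by simpa using hc
      simp only [List.foldl_nil, hlast, ite_true, ite_self]
      have : (PySem.List.pyRange 0 (PySem.Str.len i) 1).foldl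
          (fun (a : List Char) (o : Int) => a ++ [PySem.List.pyGetD i.toList o ' ']) []
          = i.toList := by
        simp only [PySem.Str.len_eq]
        rw [PySem.List.foldl_pyRange_zero_pyGetD' i.toList ' ' (fun a c => a ++ [c]) []]
        exact PySem.List.foldl_append_singleton _ []
      rw [this]
      simp [altRec]
    · have hnot : c0 + 1 ≠ N := by
        have : 1 ≤ t.length := List.length_pos_of_ne_nil ht
        simp only [List.length_cons] at hc
        omega
      simp only [hnot, if_false]
      have hinner : (PySem.List.pyRange 0 (PySem.Str.len i) 1).foldl
          (fun (a : List Char) (o : Int) =>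
            if ¬ (o > PySem.Str.len i - 2) then a ++ [PySem.List.pyGetD i.toList o ' ']
            else a) [] = i.toList.dropLast := by
        simpa [PySem.Str.len_eq] using inner_notlast i.toList
      rw [hinner, ih (b ++ [String.ofList i.toList.dropLast]) (c0 + 1)
        (by simp only [List.length_cons] at hc; omega)]
      rw [← strip_eq]
      cases t with
      | nil => exact absurd rfl ht
      | cons j u => simp [altRec]

-- ===== VERDICT (by name: the statement is the Claim_ definition above) =====
theorem linef_spec : Claim_equal_linef := by
  intro args _
  unfold Spec_linef
  rw [altRec_eq]
  have h := outer ((args.length : Int)) args [] 0 (by simp)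
  simpa [linef] using h
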